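-- pv_equiv track=rewrite | github.com/zenibako/dotfiles | scripts/wiki-index-generator.py | apply_groupby
-- ===== SOURCE A (Python) =====
-- def apply_groupby(pages: list, groupby_config: dict) -> dict:
--     """Group pages by a property."""
--     prop = groupby_config.get('property', 'file.folder')
--     direction = groupby_config.get('direction', 'ASC')
--
--     groups = {}
--     for page in pages:
--         key = page.get(prop.replace('file.', ''), '')
--         groups.setdefault(key, []).append(page)
--
--     # Sort within each group
--     for key in groups:
--         groups[key].sort(key=lambda p: p['name'].lower())
--
--     return groups
-- ===== SOURCE B (Python) =====
-- def apply_groupby(pages: list, groupby_config: dict) -> dict: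
--     """Group pages by a property."""
--     prop = groupby_config.get('property', 'file.folder')
--     direction = groupby_config.get('direction', 'ASC')
--     field = prop.replace('file.', '')
--
--     # one global stable sort by name, then one filter pass per distinct key
--     ordered = sorted(pages, key=lambda p: p['name'].lower())
--     keys = []
--     for page in pages:
--         k = page.get(field, '')
--         if k not in keys:
--             keys.append(k)
--     return {k: [p for p in ordered if p.get(field, '') == k] for k in keys}
-- ===== Notes on version B (the rewrite author's own statement) =====
-- stated objective: alternative
-- what changed: A builds groups incrementally with dict.setdefault and then sorts each group separately; B first collects the distinct keys in first-occurrence order, performs one global stable sort of all pages by lowercased name, and builds each group by filtering the sorted list per key, with no per-group sort and no incremental dict updates.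
import Mathlib
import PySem

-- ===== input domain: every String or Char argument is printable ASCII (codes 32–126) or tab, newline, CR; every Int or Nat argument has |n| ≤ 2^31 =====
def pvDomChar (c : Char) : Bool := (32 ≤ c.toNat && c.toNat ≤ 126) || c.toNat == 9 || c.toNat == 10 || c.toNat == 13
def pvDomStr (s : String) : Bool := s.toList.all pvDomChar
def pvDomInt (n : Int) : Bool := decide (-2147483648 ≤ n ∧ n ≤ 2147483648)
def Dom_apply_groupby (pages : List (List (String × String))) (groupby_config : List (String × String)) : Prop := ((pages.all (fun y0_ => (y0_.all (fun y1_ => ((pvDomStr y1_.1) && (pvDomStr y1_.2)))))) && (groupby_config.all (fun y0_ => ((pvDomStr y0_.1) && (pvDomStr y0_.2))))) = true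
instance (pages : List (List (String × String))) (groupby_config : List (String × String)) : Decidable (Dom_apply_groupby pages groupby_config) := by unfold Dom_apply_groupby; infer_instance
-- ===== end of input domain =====

-- B replaces A's incremental setdefault-grouping + per-group sorts by: distinct keys in
-- first-occurrence order, ONE global stable sort of all pages, and one filter per key
-- (objective: alternative decomposition; same observable return value).

-- shared helper: Python dict.get(k, dflt) on an association list (first match)
def pvGetD (d : List (String × String)) (k dflt : String) : String :=
  match d.find? (fun kv => kv.1 == k) with
  | some kv => kv.2
  | none => dflt

-- ===== PORT A =====
-- groups.setdefault(key, []).append(page): append to the entry for k, or create it at the end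
def pvUpsert (g : List (String × List (List (String × String)))) (k : String)
    (page : List (String × String)) : List (String × List (List (String × String))) :=
  match g with
  | [] => [(k, [page])]
  | (k', v) :: rest => if k' == k then (k', v ++ [page]) :: rest else (k', v) :: pvUpsert rest k page

def apply_groupby (pages : List (List (String × String))) (groupby_config : List (String × String)) : List (String × List (List (String × String))) :=
  let prop := pvGetD groupby_config "property" "file.folder"
  let _direction := pvGetD groupby_config "direction" "ASC"
  let field := PySem.Str.replace prop "file." ""
  let groups := pages.foldl (fun g page => pvUpsert g (pvGetD page field "") page) []
  -- for key in groups: groups[key].sort(key=lambda p: p['name'].lower())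
  groups.map (fun kv =>
    (kv.1, PySem.List.sorted kv.2 (fun p => PySem.Str.lower (pvGetD p "name" "")) false))

-- ===== PORT B =====
def apply_groupby_alt (pages : List (List (String × String))) (groupby_config : List (String × String)) : List (String × List (List (String × String))) :=
  let prop := pvGetD groupby_config "property" "file.folder"
  let _direction := pvGetD groupby_config "direction" "ASC"
  let field := PySem.Str.replace prop "file." ""
  -- ordered = sorted(pages, key=lambda p: p['name'].lower())
  let ordered := PySem.List.sorted pages (fun p => PySem.Str.lower (pvGetD p "name" "")) false
  -- keys = []; for page in pages: k = page.get(field, ''); if k not in keys: keys.append(k)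
  let keys := pages.foldl (fun ks page =>
    let k := pvGetD page field ""
    if ks.contains k then ks else ks ++ [k]) []
  -- {k: [p for p in ordered if p.get(field, '') == k] for k in keys}
  keys.map (fun k => (k, ordered.filter (fun p => pvGetD p field "" == k)))

-- ===== PRECONDITION & SPEC =====
-- Pre_ excludes pages missing a 'name' key: there Python A raises KeyError in the sort key
-- (and B raises the same KeyError during its global sort).
def Pre_apply_groupby (pages : List (List (String × String))) (groupby_config : List (String × String)) : Prop :=
  pages.all (fun page => page.any (fun kv => kv.1 == "name")) = true
instance (pages : List (List (String × String))) (groupby_config : List (String × String)) : Decidable (Pre_apply_groupby pages groupby_config) := by unfold Pre_apply_groupby; infer_instance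

def pvWitness_apply_groupby : (List (List (String × String))) × (List (String × String)) :=
  ([[("name", "B"), ("folder", "x")], [("name", "a"), ("folder", "y")], [("name", "A"), ("folder", "x")]],
   [("property", "file.folder")])

def Spec_apply_groupby (pages : List (List (String × String))) (groupby_config : List (String × String)) (out : List (String × List (List (String × String)))) : Prop := out = apply_groupby_alt pages groupby_config
instance (pages : List (List (String × String))) (groupby_config : List (String × String)) (out : List (String × List (List (String × String)))) : Decidable (Spec_apply_groupby pages groupby_config out) := by unfold Spec_apply_groupby; infer_instance

-- ===== CLAIM (what is proved, stated in full; the proofs are below) =====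
def Claim_equal_apply_groupby : Prop := ∀ (pages : List (List (String × String))) (groupby_config : List (String × String)), Dom_apply_groupby pages groupby_config → Pre_apply_groupby pages groupby_config → Spec_apply_groupby pages groupby_config (apply_groupby pages groupby_config)

-- ===== LEMMAS AND PROOFS =====

-- abbreviation used only by the proofs
abbrev PvPage : Type := List (String × String)

-- characterisation of A's grouping loop
theorem pvUpsert_mem_spec (ks : List String) (F : String → List PvPage) (k : String)
    (p : PvPage) (hk : k ∈ ks) (hnd : ks.Nodup) :
    pvUpsert (ks.map (fun k' => (k', F k'))) k p =
      ks.map (fun k' => (k', F k' ++ if k == k' then [p] else [])) := by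
  induction ks with
  | nil => cases hk
  | cons a t ih =>
    simp only [List.map_cons, pvUpsert]
    by_cases hak : a = k
    · subst hak
      simp only [BEq.rfl, if_true]
      congr 1
      apply List.map_congr_left
      intro k' hk'
      have hne : a ≠ k' := by
        rintro rfl; exact (List.nodup_cons.mp hnd).1 hk'
      have : (a == k') = false := beq_eq_false_iff_ne.mpr hne
      simp [this]
    · have hka : (a == k) = false := beq_eq_false_iff_ne.mpr hak
      have hk' : k ∈ t := by
        rcases List.mem_cons.mp hk with h | h
        · exact absurd h.symm hak
        · exact h
      simp only [hka]
      rw [ih hk' (List.nodup_cons.mp hnd).2]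
      have : (k == a) = false := beq_eq_false_iff_ne.mpr (fun h => hak h.symm)
      simp [this]

theorem pvUpsert_not_mem (ks : List String) (F : String → List PvPage) (k : String)
    (p : PvPage) (hk : k ∉ ks) :
    pvUpsert (ks.map (fun k' => (k', F k'))) k p =
      ks.map (fun k' => (k', F k')) ++ [(k, [p])] := by
  induction ks with
  | nil => simp [pvUpsert]
  | cons a t ih =>
    have hak : (a == k) = false := by
      simp only [beq_eq_false_iff_ne]; rintro rfl; exact hk (List.mem_cons_self)
    simp [List.map_cons, pvUpsert, hak, List.cons_append,
      ih (fun h => hk (List.mem_cons_of_mem _ h))]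

theorem pvGroupsA_spec (key : PvPage → String) (pages : List PvPage) :
    pages.foldl (fun g page => pvUpsert g (key page) page) [] =
      (PySem.List.dedup (pages.map key)).map
        (fun k => (k, pages.filter (fun p => key p == k))) := by
  induction pages using List.reverseRecOn with
  | nil => simp [PySem.List.dedup]
  | append_singleton l p ih =>
    rw [List.foldl_append, List.foldl_cons, List.foldl_nil, ih]
    simp only [PySem.List.dedup_eq_ofList, List.map_append, List.map_cons, List.map_nil,
      PySem.Set.ofList_append_singleton, PySem.Set.add_eq_ite]
    have hnd := PySem.Set.nodup_ofList (l.map key)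
    by_cases hmem : key p ∈ PySem.Set.ofList (l.map key)
    · rw [if_pos hmem, pvUpsert_mem_spec _ _ _ _ hmem hnd]
      apply List.map_congr_left
      intro k _
      by_cases h : key p = k
      · simp [List.filter_append, List.filter_nil, h]
      · simp [List.filter_append, List.filter_nil, h]
    · rw [if_neg hmem, pvUpsert_not_mem _ _ _ _ hmem, List.map_append]
      congr 1
      · apply List.map_congr_left
        intro k hkmem
        have hne : key p ≠ k := fun h => hmem (h ▸ hkmem)
        simp only [List.filter_append, List.filter_cons, List.filter_nil]
        simp [hne]
      · have hnotl : key p ∉ l.map key := fun h => hmem ((PySem.Set.mem_ofList _ _).mpr h)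
        have hfil : l.filter (fun q => key q == key p) = [] := by
          rw [List.filter_eq_nil_iff]
          intro q hq hbeq
          exact hnotl (List.mem_map.mpr ⟨q, hq, eq_of_beq hbeq⟩)
        simp [List.filter_append, hfil]

-- characterisation of B's key-collecting loop
theorem pvKeys_spec (key : PvPage → String) (pages : List PvPage) :
    pages.foldl (fun ks page =>
        let k := key page
        if ks.contains k then ks else ks ++ [k]) [] =
      PySem.List.dedup (pages.map key) := by
  induction pages using List.reverseRecOn with
  | nil => simp [PySem.List.dedup]
  | append_singleton l p ih =>
    rw [List.foldl_append, List.foldl_cons, List.foldl_nil, ih]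
    simp only [PySem.List.dedup_eq_ofList, List.map_append, List.map_cons, List.map_nil,
      PySem.Set.ofList_append_singleton, PySem.Set.add_eq_ite]
    by_cases hmem : key p ∈ PySem.Set.ofList (l.map key)
    · have hc : List.contains (PySem.Set.ofList (l.map key)) (key p) = true :=
        List.elem_eq_true_of_mem hmem
      simp only [hc, if_true, if_pos hmem]
    · have hc : List.contains (PySem.Set.ofList (l.map key)) (key p) = false := by
        simpa using hmem
      simp only [hc, Bool.false_eq_true, if_false, if_neg hmem]

-- a stable insertion sort commutes with filtering
theorem pvInsertBy_nil (bf : PvPage → PvPage → Bool) (x : PvPage) :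
    PySem.List.insertBy bf x [] = [x] := rfl

theorem pvInsertBy_cons (bf : PvPage → PvPage → Bool) (x y : PvPage) (ys : List PvPage) :
    PySem.List.insertBy bf x (y :: ys) =
      if bf x y then x :: y :: ys else y :: PySem.List.insertBy bf x ys := rfl

theorem pvInsertBy_filter (key : PvPage → String) (P : PvPage → Bool) (x : PvPage) :
    ∀ ys : List PvPage, ys.Pairwise (fun a b => key a ≤ key b) →
      (PySem.List.insertBy (fun a b => decide (key a < key b)) x ys).filter P =
        if P x then PySem.List.insertBy (fun a b => decide (key a < key b)) x (ys.filter P)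
        else ys.filter P := by
  intro ys
  induction ys with
  | nil =>
    intro _
    by_cases hPx : P x = true
    · simp only [pvInsertBy_nil, List.filter_cons, List.filter_nil, hPx, if_true]
    · have hPx' : P x = false := eq_false_of_ne_true hPx
      simp only [pvInsertBy_nil, List.filter_cons, List.filter_nil, hPx', Bool.false_eq_true,
        if_false]
  | cons y t ih =>
    intro hpw
    have hpwt : t.Pairwise (fun a b => key a ≤ key b) := hpw.tail
    have hhead : ∀ z ∈ t, key y ≤ key z := (List.pairwise_cons.mp hpw).1
    rw [pvInsertBy_cons]
    cases hlt : decide (key x < key y) with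
    | true =>
      simp only [if_true]
      have hxy : key x < key y := of_decide_eq_true hlt
      by_cases hPx : P x = true
      · by_cases hPy : P y = true
        · simp only [List.filter_cons, hPx, hPy, if_true, pvInsertBy_cons, hlt]
        · have hPy' : P y = false := eq_false_of_ne_true hPy
          simp only [List.filter_cons, hPx, hPy', Bool.false_eq_true, if_false, if_true]
          cases hft : t.filter P with
          | nil => rw [pvInsertBy_nil]
          | cons z zs =>
            have hz : z ∈ t := List.mem_of_mem_filter (hft ▸ List.mem_cons_self)
            have : decide (key x < key z) = true :=
              decide_eq_true (lt_of_lt_of_le hxy (hhead z hz))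
            rw [pvInsertBy_cons]
            simp only [this, if_true]
      · have hPx' : P x = false := eq_false_of_ne_true hPx
        simp only [List.filter_cons, hPx', Bool.false_eq_true, if_false]
    | false =>
      rw [if_neg Bool.false_ne_true]
      by_cases hPy : P y = true
      · simp only [List.filter_cons, hPy, if_true]
        rw [ih hpwt]
        by_cases hPx : P x = true
        · simp only [hPx, if_true, pvInsertBy_cons, hlt, Bool.false_eq_true, if_false]
        · have hPx' : P x = false := eq_false_of_ne_true hPx
          simp only [hPx', Bool.false_eq_true, if_false]
      · have hPy' : P y = false := eq_false_of_ne_true hPy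
        simp only [List.filter_cons, hPy', Bool.false_eq_true, if_false]
        rw [ih hpwt]

theorem pvSorted_append_singleton (key : PvPage → String) (l : List PvPage) (x : PvPage) :
    PySem.List.sorted (l ++ [x]) key false =
      PySem.List.insertBy (fun a b => decide (key a < key b)) x (PySem.List.sorted l key false) := by
  rw [PySem.List.sorted_eq_foldl_insertBy, PySem.List.sorted_eq_foldl_insertBy, List.foldl_append,
    List.foldl_cons, List.foldl_nil]

theorem pvSorted_filter (key : PvPage → String) (P : PvPage → Bool) (pages : List PvPage) :
    (PySem.List.sorted pages key false).filter P =
      PySem.List.sorted (pages.filter P) key false := by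
  induction pages using List.reverseRecOn with
  | nil => simp [PySem.List.sorted]
  | append_singleton l x ih =>
    rw [pvSorted_append_singleton, pvInsertBy_filter key P x _ (PySem.List.sorted_pairwise l key),
      ih, List.filter_append, List.filter_cons, List.filter_nil]
    by_cases hPx : P x
    · simp only [hPx, if_true]
      rw [pvSorted_append_singleton]
    · simp [hPx]

-- ===== VERDICT (by name: the statement is the Claim_ definition above) =====
theorem apply_groupby_spec : Claim_equal_apply_groupby := by
  intro pages groupby_config _hdom _hpre
  unfold Spec_apply_groupby apply_groupby apply_groupby_alt
  simp only []
  set field := PySem.Str.replace (pvGetD groupby_config "property" "file.folder") "file." "" with hfield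
  set key : PvPage → String := fun p => pvGetD p field "" with hkey
  set nk : PvPage → String := fun p => PySem.Str.lower (pvGetD p "name" "") with hnk
  rw [pvGroupsA_spec key pages, pvKeys_spec key pages, List.map_map]
  apply List.map_congr_left
  intro k _
  simp only [Function.comp]
  rw [pvSorted_filter nk (fun p => key p == k) pages]
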